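-- pv_equiv track=rewrite | github.com/cmaulany/aoc2015 | day18/day18.py | sum_after_ticks
-- ===== SOURCE A (Python) =====
-- from itertools import product
--
-- def neighbors(lights, position):
--     positions = [
--         map(sum, zip(position, delta))
--         for delta in product([1, 0, -1], [1, 0, -1])
--         if delta != (0, 0)
--     ]
--     width = len(lights[0])
--     height = len(lights)
--     return [
--         (x, y) for x, y in positions if x >= 0 and x < width and y >= 0 and y < height
--     ]
--
-- def tick(lights):
--     next_lights = []
--     for y, row in enumerate(lights):
--         next_lights.append([])
--         for x, on in enumerate(row):
--             on_neighbors = sum(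
--                 lights[neighbor[1]][neighbor[0]]
--                 for neighbor in neighbors(lights, (x, y))
--             )
--             next_lights[y].append((on and on_neighbors in [2, 3]) or on_neighbors == 3)
--
--     return next_lights
--
-- def sum_after_ticks(lights, n, stuck=False):
--     for _ in range(n):
--         if stuck:
--             for x, y in product([0, 99], [0, 99]):
--                 lights[y][x] = True
--         lights = tick(lights)
--     if stuck:
--         for x, y in product([0, 99], [0, 99]):
--             lights[y][x] = True
--
--     return sum(on for row in lights for on in row)
-- ===== SOURCE B (Python) =====
-- # Same result as A, but the tick is computed via per-row prefix sums:
-- # each cell's neighbor count is two prefix-sum lookups per adjacent row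
-- # (a window sum) instead of building and filtering an 8-neighbor list.
-- # Like A, when stuck=True the corner writes mutate the input grid in place.
--
-- def _tick_prefix(lights):
--     if not lights:
--         return []
--     width = len(lights[0])
--     height = len(lights)
--     # prefix sums over the first `width` columns of each row (missing cells = 0)
--     pref = []
--     for row in lights:
--         p = [0]
--         for i in range(width):
--             p.append(p[-1] + (1 if i < len(row) and row[i] else 0))
--         pref.append(p)
--
--     def window(r, x):
--         # lit cells of row r in columns [x-1, x+1] clipped to [0, width)
--         if r < 0 or r >= height:
--             return 0
--         p = pref[r]
--         lo = min(max(x - 1, 0), width)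
--         hi = min(x + 2, width)
--         return p[hi] - p[lo]
--
--     out = []
--     for y, row in enumerate(lights):
--         new = []
--         for x, on in enumerate(row):
--             self_lit = 1 if (x < width and on) else 0
--             c = window(y - 1, x) + window(y, x) + window(y + 1, x) - self_lit
--             new.append(c == 3 or (on and c == 2))
--         out.append(new)
--     return out
--
--
-- def sum_after_ticks(lights, n, stuck=False):
--     for _ in range(n):
--         if stuck:
--             for x in (0, 99):
--                 for y in (0, 99):
--                     lights[y][x] = True
--         lights = _tick_prefix(lights)
--     if stuck:
--         for x in (0, 99):
--             for y in (0, 99):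
--                 lights[y][x] = True
--     return sum(row.count(True) for row in lights)
-- ===== Notes on version B (the rewrite author's own statement) =====
-- stated objective: alternative
-- what changed: The tick is recomputed via per-row prefix sums: B builds one prefix-sum array per row and derives every cell's neighbor count from two prefix lookups per adjacent row (clipped window sums) plus a self-correction, instead of A's per-cell construction and bounds-filtering of an 8-element neighbor-coordinate list; the final total is a per-row count instead of a generator sum.
import Mathlib
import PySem

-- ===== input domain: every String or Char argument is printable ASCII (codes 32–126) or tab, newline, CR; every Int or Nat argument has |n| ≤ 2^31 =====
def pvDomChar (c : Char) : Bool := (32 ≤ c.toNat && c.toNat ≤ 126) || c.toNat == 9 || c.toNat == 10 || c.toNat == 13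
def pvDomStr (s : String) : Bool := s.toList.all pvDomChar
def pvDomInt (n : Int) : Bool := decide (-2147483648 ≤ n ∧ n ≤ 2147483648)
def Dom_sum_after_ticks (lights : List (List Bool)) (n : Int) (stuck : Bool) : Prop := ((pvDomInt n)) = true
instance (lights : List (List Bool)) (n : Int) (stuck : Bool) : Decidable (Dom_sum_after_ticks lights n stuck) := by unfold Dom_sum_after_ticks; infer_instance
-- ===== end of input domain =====

-- B replaces A's per-cell 8-neighbor gather with per-row prefix sums (window sums);
-- objective: alternative. Return-value equivalence only: with stuck=True both Pythons
-- mutate the input grid's corner rows in place (same writes, same order).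

-- helpers shared by both ports --------------------------------------------------
-- width = len(lights[0])  (both Pythons compute it this way)
def pvW (lights : List (List Bool)) : Nat := ((PySem.List.pyGet? lights 0).getD []).length

-- lights[y][x] = True; total (List.set is a no-op out of range; Pre_ keeps the
-- indices in range whenever stuck=True)
def pvSetTrue (L : List (List Bool)) (y x : Nat) : List (List Bool) :=
  L.set y ((L.getD y []).set x true)

-- the four corner writes `for x, y in product([0, 99], [0, 99]): lights[y][x] = True`,
-- in product order (x,y) = (0,0),(0,99),(99,0),(99,99); B performs the same writes in the same order
def pvSetCorners (L : List (List Bool)) : List (List Bool) :=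
  pvSetTrue (pvSetTrue (pvSetTrue (pvSetTrue L 0 0) 99 0) 0 99) 99 99

-- ===== PORT A =====
-- product([1, 0, -1], [1, 0, -1]) without (0, 0), in product order
def pvDeltas : List (Int × Int) := [(1,1),(1,0),(1,-1),(0,1),(0,-1),(-1,1),(-1,0),(-1,-1)]

def pyNeighbors (lights : List (List Bool)) (x y : Int) : List (Int × Int) :=
  let positions := pvDeltas.map (fun d => (x + d.1, y + d.2))
  let width : Int := (pvW lights : Int)
  let height : Int := (lights.length : Int)
  positions.filter (fun p =>
    decide (0 ≤ p.1) && decide (p.1 < width) && decide (0 ≤ p.2) && decide (p.2 < height))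

-- lights[y][x] read as 0/1 (bools are summed); in range on Pre_ (the getD defaults are unreached there)
def pyReadA (lights : List (List Bool)) (x y : Int) : Int :=
  if (PySem.List.pyGet? ((PySem.List.pyGet? lights y).getD []) x).getD false then 1 else 0

def pyTick (lights : List (List Bool)) : List (List Bool) :=
  (PySem.List.enumerate lights).map (fun yrow =>
    (PySem.List.enumerate yrow.2).map (fun xon =>
      let cnt := ((pyNeighbors lights xon.1 yrow.1).map (fun p => pyReadA lights p.1 p.2)).sum
      (xon.2 && (cnt == 2 || cnt == 3)) || cnt == 3))

def sum_after_ticks (lights : List (List Bool)) (n : Int) (stuck : Bool) : Int :=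
  let final := (PySem.List.pyRange 0 n 1).foldl
    (fun L _ => pyTick (if stuck then pvSetCorners L else L)) lights
  let final2 := if stuck then pvSetCorners final else final
  (final2.map (fun row => (row.map (fun on => if on then (1 : Int) else 0)).sum)).sum

-- ===== PORT B =====
-- p = [0]; for i in range(width): p.append(p[-1] + (1 if i < len(row) and row[i] else 0))
-- ('i < len(row) and row[i]' is exactly (row[i]?).getD false)
def altPrefRow (row : List Bool) (width : Nat) : List Int :=
  (List.range width).foldl
    (fun p i => p ++ [PySem.List.pyGetD p (-1) 0 + (if (row[i]?).getD false then 1 else 0)])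
    [0]

def altWindow (pref : List (List Int)) (width height : Nat) (r x : Int) : Int :=
  if r < 0 ∨ (height : Int) ≤ r then 0
  else
    let p := PySem.List.pyGetD pref r []
    let lo := min (max (x - 1) 0) (width : Int)
    let hi := min (x + 2) (width : Int)
    PySem.List.pyGetD p hi 0 - PySem.List.pyGetD p lo 0

def altTick (lights : List (List Bool)) : List (List Bool) :=
  if lights.isEmpty then []
  else
    let width := pvW lights
    let height := lights.length
    let pref := lights.map (fun row => altPrefRow row width)
    (PySem.List.enumerate lights).map (fun yrow =>
      (PySem.List.enumerate yrow.2).map (fun xon =>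
        let selfLit : Int := if decide (xon.1 < (width : Int)) && xon.2 then 1 else 0
        let c := altWindow pref width height (yrow.1 - 1) xon.1
               + altWindow pref width height yrow.1 xon.1
               + altWindow pref width height (yrow.1 + 1) xon.1 - selfLit
        c == 3 || (xon.2 && c == 2)))

def sum_after_ticks_alt (lights : List (List Bool)) (n : Int) (stuck : Bool) : Int :=
  let final := (PySem.List.pyRange 0 n 1).foldl
    (fun L _ => altTick (if stuck then pvSetCorners L else L)) lights
  let final2 := if stuck then pvSetCorners final else final
  (final2.map (fun row => ((PySem.List.count row true : Nat) : Int))).sum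

-- ===== PRECONDITION & SPEC =====
-- Exactly the inputs on which the Python A returns: with stuck=True the four corner
-- cells lights[0|99][0|99] must exist (else the writes raise IndexError), and when at
-- least one tick runs, no cell's in-bounds neighbor read lights[ny][nx] (bounds taken
-- from len(lights[0]) and len(lights)) may fall beyond a shorter ragged row's length
-- (else the first tick raises IndexError; ticks preserve the grid's shape, so the
-- first tick's reads are every tick's reads). Rectangular grids always satisfy it.
def pvReadsOK (lights : List (List Bool)) : Bool :=
  (List.range lights.length).all fun y =>
    (List.range (lights.getD y []).length).all fun x =>
      pvDeltas.all fun d =>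
        if 0 ≤ (x : Int) + d.1 ∧ (x : Int) + d.1 < (pvW lights : Int) ∧
           0 ≤ (y : Int) + d.2 ∧ (y : Int) + d.2 < (lights.length : Int)
        then decide ((x : Int) + d.1 < ((lights.getD ((y : Int) + d.2).toNat []).length : Int))
        else true

def Pre_sum_after_ticks (lights : List (List Bool)) (n : Int) (stuck : Bool) : Prop :=
  (stuck = false ∨
    100 ≤ lights.length ∧ 100 ≤ (lights.getD 0 []).length ∧ 100 ≤ (lights.getD 99 []).length) ∧
  (n ≤ 0 ∨ pvReadsOK lights = true)
instance (lights : List (List Bool)) (n : Int) (stuck : Bool) :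
    Decidable (Pre_sum_after_ticks lights n stuck) := by unfold Pre_sum_after_ticks; infer_instance

def pvWitness_sum_after_ticks : List (List Bool) × Int × Bool :=
  ([[true, false, true], [false, true, false], [true, true, false]], 2, false)

def Spec_sum_after_ticks (lights : List (List Bool)) (n : Int) (stuck : Bool) (out : Int) : Prop := out = sum_after_ticks_alt lights n stuck
instance (lights : List (List Bool)) (n : Int) (stuck : Bool) (out : Int) : Decidable (Spec_sum_after_ticks lights n stuck out) := by unfold Spec_sum_after_ticks; infer_instance

-- ===== CLAIM (what is proved, stated in full; the proofs are below) =====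
def Claim_equal_sum_after_ticks : Prop := ∀ (lights : List (List Bool)) (n : Int) (stuck : Bool), Dom_sum_after_ticks lights n stuck → Pre_sum_after_ticks lights n stuck → Spec_sum_after_ticks lights n stuck (sum_after_ticks lights n stuck)

-- ===== LEMMAS AND PROOFS =====

-- a single guarded 0/1 read: the common value of A's filtered neighbor reads and of
-- B's window-sum contributions
def pvG (lights : List (List Bool)) (u v : Int) : Int :=
  if 0 ≤ u ∧ u < (pvW lights : Int) ∧ 0 ≤ v ∧ v < (lights.length : Int)
  then pyReadA lights u v else 0

def pvRead (row : List Bool) (i : Nat) : Int := if (row[i]?).getD false then 1 else 0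

def pvCnt (row : List Bool) : Nat → Int
  | 0 => 0
  | k + 1 => pvCnt row k + pvRead row k

def pvGr (row : List Bool) (W : Nat) (u : Int) : Int :=
  if 0 ≤ u ∧ u < (W : Int) then pvRead row u.toNat else 0

def pvCg (row : List Bool) (W : Nat) : Nat → Int
  | 0 => 0
  | k + 1 => pvCg row W k + pvGr row W (k : Int)

theorem altPrefRow_eq (row : List Bool) (W : Nat) :
    altPrefRow row W = (List.range (W + 1)).map (pvCnt row) := by
  induction W with
  | zero => rfl
  | succ W ih =>
    unfold altPrefRow at ih ⊢
    rw [List.range_succ, List.foldl_append, ih]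
    simp only [List.foldl_cons, List.foldl_nil]
    have h1 : (List.range (W + 1 + 1)).map (pvCnt row)
        = (List.range (W + 1)).map (pvCnt row) ++ [pvCnt row (W + 1)] := by
      rw [List.range_succ (n := W + 1), List.map_append]; rfl
    have h2 : (List.range (W + 1)).map (pvCnt row)
        = (List.range W).map (pvCnt row) ++ [pvCnt row W] := by
      rw [List.range_succ, List.map_append]; rfl
    rw [h1]
    congr 1
    rw [h2, PySem.List.pyGetD_neg_one_append_singleton]
    simp [pvCnt, pvRead]

theorem pvCnt_min (row : List Bool) (W : Nat) : ∀ k, pvCnt row (min k W) = pvCg row W k := by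
  intro k
  induction k with
  | zero => simp [pvCnt, pvCg]
  | succ k ih =>
    by_cases h : k < W
    · have h1 : min (k + 1) W = min k W + 1 := by omega
      have h2 : min k W = k := by omega
      rw [pvCg, ← ih, h1, pvCnt, h2]
      have : pvGr row W (k : Int) = pvRead row k := by
        rw [pvGr, if_pos (by constructor <;> omega)]; simp
      omega
    · have h1 : min (k + 1) W = min k W := by omega
      have h2 : pvGr row W (k : Int) = 0 := by rw [pvGr, if_neg (by omega)]
      rw [pvCg, ← ih, h1, h2, add_zero]

theorem pvCg_window (row : List Bool) (W : Nat) (j : Nat) :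
    pvCg row W (j + 2) - pvCg row W (j - 1)
      = pvGr row W ((j : Int) - 1) + pvGr row W (j : Int) + pvGr row W ((j : Int) + 1) := by
  cases j with
  | zero =>
    have h : pvGr row W ((0 : Int) - 1) = 0 := by rw [pvGr, if_neg (by omega)]
    simp only [Nat.zero_sub, Nat.cast_zero] at *
    rw [h]
    show pvCg row W 2 - pvCg row W 0 = _
    rw [pvCg, pvCg, pvCg, show pvCg row W 0 = 0 from rfl]
    push_cast
    ring
  | succ m =>
    have e1 : m + 1 + 2 = (m + 1) + 1 + 1 := by omega
    have e2 : m + 1 - 1 = m := by omega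
    rw [e1, e2, pvCg, pvCg, pvCg]
    have c1 : ((m + 1 : Nat) : Int) - 1 = (m : Int) := by push_cast; ring
    have c2 : ((m + 1 : Nat) : Int) + 1 = ((m + 1 + 1 : Nat) : Int) := by push_cast; ring
    rw [c1, c2]
    ring

theorem pvGr_eq_pvG (lights : List (List Bool)) (r : Int) (t : Nat)
    (h0 : 0 ≤ r) (ht : r.toNat = t) (hlt : t < lights.length) (u : Int) :
    pvGr lights[t] (pvW lights) u = pvG lights u r := by
  unfold pvGr pvG
  by_cases hu : 0 ≤ u ∧ u < ((pvW lights : Nat) : Int)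
  · rw [if_pos hu, if_pos ⟨hu.1, hu.2, h0, by omega⟩]
    unfold pyReadA pvRead
    rw [PySem.List.pyGet?_of_nonneg lights h0, ht]
    rw [List.getElem?_eq_getElem hlt]
    simp only [Option.getD_some]
    simp only [PySem.List.pyGet?_of_nonneg lights[t] hu.1]
  · rw [if_neg hu, if_neg (by tauto)]

theorem window_eq (lights : List (List Bool)) (r : Int) (j : Nat) :
    altWindow (lights.map (fun row => altPrefRow row (pvW lights))) (pvW lights)
        lights.length r (j : Int)
      = pvG lights ((j : Int) - 1) r + pvG lights (j : Int) r + pvG lights ((j : Int) + 1) r := by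
  unfold altWindow
  by_cases hr : r < 0 ∨ (lights.length : Int) ≤ r
  · rw [if_pos hr]
    unfold pvG
    rcases hr with h | h <;>
      rw [if_neg (by omega), if_neg (by omega), if_neg (by omega)] <;> ring
  · rw [if_neg hr]
    have h0 : 0 ≤ r := by omega
    have hlen : r < (lights.length : Int) := by omega
    have hlt : r.toNat < lights.length := by omega
    set W := pvW lights with hW
    set row := lights[r.toNat] with hrow
    have hp : PySem.List.pyGetD (lights.map (fun row => altPrefRow row W)) r []
        = (List.range (W + 1)).map (pvCnt row) := by
      rw [PySem.List.pyGetD_eq_getElem _ _ h0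
        (by simpa using (by omega : r < (lights.length : Int)))]
      rw [List.getElem_map]
      exact altPrefRow_eq _ _
    simp only [hp]
    have hget : ∀ m : Nat, m ≤ W →
        PySem.List.pyGetD ((List.range (W + 1)).map (pvCnt row)) (m : Int) 0 = pvCnt row m := by
      intro m hm
      rw [PySem.List.pyGetD_eq_getElem _ _ (by omega) (by simp; omega)]
      simp
    have hhi : min ((j : Int) + 2) (W : Int) = ((min (j + 2) W : Nat) : Int) := by omega
    have hlo : min (max ((j : Int) - 1) 0) (W : Int) = ((min (j - 1) W : Nat) : Int) := by omega
    rw [hhi, hlo, hget _ (by omega), hget _ (by omega), pvCnt_min, pvCnt_min, pvCg_window]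
    rw [pvGr_eq_pvG lights r r.toNat h0 rfl hlt, pvGr_eq_pvG lights r r.toNat h0 rfl hlt,
        pvGr_eq_pvG lights r r.toNat h0 rfl hlt]

theorem sum_filter_map {α : Type} (l : List α) (p : α → Bool) (f : α → Int) :
    ((l.filter p).map f).sum = (l.map (fun a => if p a then f a else 0)).sum := by
  induction l with
  | nil => rfl
  | cons a l ih => by_cases h : p a <;> simp [h, ih]

theorem pvG_guard (lights : List (List Bool)) (u v : Int) :
    (if (decide (0 ≤ u) && decide (u < (pvW lights : Int)) && decide (0 ≤ v)
          && decide (v < (lights.length : Int))) = true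
     then pyReadA lights u v else 0) = pvG lights u v := by
  simp only [Bool.and_eq_true, decide_eq_true_eq, pvG]
  split_ifs <;> first | rfl | tauto

theorem cntA_eq (lights : List (List Bool)) (x y : Int) :
    ((pyNeighbors lights x y).map (fun p => pyReadA lights p.1 p.2)).sum
      = pvG lights (x + 1) (y + 1) + pvG lights (x + 1) y + pvG lights (x + 1) (y - 1)
      + pvG lights x (y + 1) + pvG lights x (y - 1)
      + pvG lights (x - 1) (y + 1) + pvG lights (x - 1) y + pvG lights (x - 1) (y - 1) := by
  unfold pyNeighbors
  rw [sum_filter_map]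
  simp only [pvDeltas, List.map_cons, List.map_nil, List.sum_cons, List.sum_nil, pvG_guard,
    add_zero]
  ring_nf

-- the two spellings of the life rule agree once the neighbor counts agree
theorem rule_eq (on : Bool) (a b : Int) (h : a = b) :
    ((on && (a == 2 || a == 3)) || a == 3) = (b == 3 || (on && b == 2)) := by
  subst h
  cases on <;> by_cases h2 : a = 2 <;> by_cases h3 : a = 3 <;> simp [h2, h3, Bool.or_comm]

theorem pvSelf_eq (lights : List (List Bool)) (k j : Nat) (hk : k < lights.length)
    (hj : j < lights[k].length) :
    (if decide ((j : Int) < (pvW lights : Int)) && lights[k][j] then (1 : Int) else 0)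
      = pvG lights (j : Int) (k : Int) := by
  have hread : pyReadA lights (j : Int) (k : Int) = (if lights[k][j] then (1 : Int) else 0) := by
    unfold pyReadA
    simp only [PySem.List.pyGet?_of_nonneg lights (Int.natCast_nonneg k), Int.toNat_natCast,
      List.getElem?_eq_getElem hk, Option.getD_some]
    simp only [PySem.List.pyGet?_of_nonneg lights[k] (Int.natCast_nonneg j), Int.toNat_natCast,
      List.getElem?_eq_getElem hj, Option.getD_some]
  unfold pvG
  by_cases hw : (j : Int) < (pvW lights : Int)
  · have hL : (if decide ((j : Int) < (pvW lights : Int)) && lights[k][j] then (1 : Int) else 0)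
        = if lights[k][j] then (1 : Int) else 0 := by simp [hw]
    have hR : (if 0 ≤ (j : Int) ∧ (j : Int) < (pvW lights : Int) ∧ 0 ≤ (k : Int) ∧
          (k : Int) < (lights.length : Int)
        then pyReadA lights (j : Int) (k : Int) else 0) = pyReadA lights (j : Int) (k : Int) :=
      if_pos ⟨by omega, hw, by omega, by omega⟩
    rw [hL, hR, hread]
  · have hL : (if decide ((j : Int) < (pvW lights : Int)) && lights[k][j] then (1 : Int) else 0)
        = 0 := by simp [hw]
    have hR : (if 0 ≤ (j : Int) ∧ (j : Int) < (pvW lights : Int) ∧ 0 ≤ (k : Int) ∧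
          (k : Int) < (lights.length : Int)
        then pyReadA lights (j : Int) (k : Int) else 0) = 0 := if_neg (by omega)
    rw [hL, hR]

theorem tick_eq (lights : List (List Bool)) : pyTick lights = altTick lights := by
  by_cases hE : lights.isEmpty
  · rw [List.isEmpty_iff.mp hE]; rfl
  · unfold pyTick altTick
    rw [if_neg hE]
    apply List.map_congr_left
    intro yrow hy
    rw [PySem.List.mem_enumerate_iff] at hy
    obtain ⟨k, hk, rfl⟩ := hy
    dsimp only
    apply List.map_congr_left
    intro xon hx
    rw [PySem.List.mem_enumerate_iff] at hx
    obtain ⟨j, hj, rfl⟩ := hx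
    dsimp only
    simp only [zero_add]
    rw [cntA_eq, window_eq lights ((k : Int) - 1) j, window_eq lights (k : Int) j,
        window_eq lights ((k : Int) + 1) j, pvSelf_eq lights k j hk hj]
    exact rule_eq _ _ _ (by ring)

theorem sum_rows_eq (L : List (List Bool)) :
    (L.map (fun row => (row.map (fun on => if on then (1 : Int) else 0)).sum)).sum
      = (L.map (fun row => ((PySem.List.count row true : Nat) : Int))).sum := by
  congr 1
  apply List.map_congr_left
  intro row _
  rw [PySem.List.sum_map_ite_one_zero (fun b => b) row]
  congr 1
  simp [PySem.List.count, List.count_eq_countP]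

-- ===== VERDICT (by name: the statement is the Claim_ definition above) =====
theorem sum_after_ticks_spec : Claim_equal_sum_after_ticks := by
  intro lights n stuck _ _
  unfold Spec_sum_after_ticks sum_after_ticks sum_after_ticks_alt
  have hstep : (fun (L : List (List Bool)) (_ : Int) => pyTick (if stuck then pvSetCorners L else L))
      = (fun (L : List (List Bool)) (_ : Int) => altTick (if stuck then pvSetCorners L else L)) := by
    funext L i; rw [tick_eq]
  rw [hstep, sum_rows_eq]
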